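-- pv_equiv track=rewrite | github.com/Julesc013/dominium | scripts/doc_ratio_check.py | strip_string_literals
-- ===== SOURCE A (Python) =====
-- def strip_string_literals(text):
--     out = []
--     i = 0
--     in_string = False
--     in_char = False
--     while i < len(text):
--         ch = text[i]
--         if in_string or in_char:
--             quote = '"' if in_string else "'"
--             if ch == "\n":
--                 out.append("\n")
--                 in_string = False
--                 in_char = False
--                 i += 1
--                 continue
--             if ch == "\\":
--                 if i + 1 < len(text) and text[i + 1] == "\n":
--                     out.append(" ")
--                     out.append("\n")
--                     i += 2
--                 else:
--                     out.append(" ")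
--                     if i + 1 < len(text):
--                         out.append(" ")
--                         i += 2
--                     else:
--                         i += 1
--                 continue
--             if ch == quote:
--                 out.append(" ")
--                 in_string = False
--                 in_char = False
--                 i += 1
--                 continue
--             out.append(" ")
--             i += 1
--             continue
--         if ch == '"':
--             in_string = True
--             out.append(" ")
--             i += 1
--             continue
--         if ch == "'":
--             in_char = True
--             out.append(" ")
--             i += 1
--             continue
--         out.append(ch)
--         i += 1
--     return "".join(out)
-- ===== SOURCE B (Python) =====
-- def _blank_literal(text, i, quote):
--     """Blank out a literal body starting after its opening quote.
--     Returns (blanked piece, index just past the literal)."""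
--     n = len(text)
--     piece = []
--     while i < n:
--         ch = text[i]
--         if ch == "\n":                      # unescaped newline terminates the literal
--             piece.append("\n")
--             i += 1
--             break
--         if ch == quote:                     # closing quote
--             piece.append(" ")
--             i += 1
--             break
--         if ch == "\\" and i + 1 < n:        # escape: blank both chars, keep newline visible
--             piece.append(" ")
--             piece.append("\n" if text[i + 1] == "\n" else " ")
--             i += 2
--             continue
--         piece.append(" ")                   # ordinary char, or lone trailing backslash
--         i += 1
--     return "".join(piece), i
--
--
-- def strip_string_literals(text):
--     out = []
--     i = 0
--     n = len(text)
--     while i < n: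
--         ch = text[i]
--         if ch == '"' or ch == "'":
--             piece, i = _blank_literal(text, i + 1, ch)
--             out.append(" ")
--             out.append(piece)
--         else:
--             out.append(ch)
--             i += 1
--     return "".join(out)
-- ===== Notes on version B (the rewrite author's own statement) =====
-- stated objective: simpler
-- what changed: Replaces A's single index loop driven by in_string/in_char boolean flags with a flag-free scanner: a helper consumes one whole literal at a time and returns the blanked piece plus the resume position, so the main loop only copies ordinary text and delegates at quotes.
import Mathlib
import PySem

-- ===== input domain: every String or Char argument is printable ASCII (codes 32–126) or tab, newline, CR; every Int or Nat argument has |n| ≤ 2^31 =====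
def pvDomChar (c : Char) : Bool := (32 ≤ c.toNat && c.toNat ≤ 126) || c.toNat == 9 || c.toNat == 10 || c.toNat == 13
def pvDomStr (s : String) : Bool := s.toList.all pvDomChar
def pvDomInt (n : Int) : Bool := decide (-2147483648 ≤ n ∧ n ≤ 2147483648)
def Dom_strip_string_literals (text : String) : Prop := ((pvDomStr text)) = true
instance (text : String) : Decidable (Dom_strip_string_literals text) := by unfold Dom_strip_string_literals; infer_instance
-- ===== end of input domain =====

-- B replaces A's single flag-driven state machine (in_string/in_char booleans) by a flag-free
-- scanner whose helper consumes a whole literal at a time (objective: simpler decomposition).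

-- ===== PORT A =====
-- A's while loop over index i with flags in_string/in_char, transliterated as recursion over the
-- remaining characters (the lookahead text[i+1] becomes the head of the tail).
def stripA : List Char → Bool → Bool → List Char
  | [], _, _ => []
  | ch :: rest, in_string, in_char =>
    if in_string || in_char then
      let quote := if in_string then '"' else '\''
      if ch = '\n' then '\n' :: stripA rest false false
      else if ch = '\\' then
        match rest with
        | c2 :: rest2 =>
          if c2 = '\n' then ' ' :: '\n' :: stripA rest2 in_string in_char
          else ' ' :: ' ' :: stripA rest2 in_string in_char
        | [] => [' ']
      else if ch = quote then ' ' :: stripA rest false false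
      else ' ' :: stripA rest in_string in_char
    else if ch = '"' then ' ' :: stripA rest true in_char
    else if ch = '\'' then ' ' :: stripA rest in_string true
    else ch :: stripA rest in_string in_char
  termination_by l => l.length
  decreasing_by all_goals (simp only [List.length]; omega)

def strip_string_literals (text : String) : String :=
  String.ofList (stripA text.toList false false)

-- ===== PORT B =====
-- Source B's _blank_literal: consume a literal body after its opening quote, returning the blanked
-- piece and the remaining characters (the index i becomes the list suffix).
def blankLit (quote : Char) : List Char → List Char × List Char
  | [] => ([], [])
  | ch :: rest =>
    if ch = '\n' then (['\n'], rest)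
    else if ch = quote then ([' '], rest)
    else if ch = '\\' ∧ rest ≠ [] then
      match rest with
      | c2 :: rest2 =>
        (' ' :: (if c2 = '\n' then '\n' else ' ') :: (blankLit quote rest2).1,
          (blankLit quote rest2).2)
      | [] => ([' '], [])
    else
      (' ' :: (blankLit quote rest).1, (blankLit quote rest).2)
  termination_by l => l.length
  decreasing_by all_goals (simp only [List.length]; omega)

theorem blankLit_len (quote : Char) (l : List Char) : (blankLit quote l).2.length ≤ l.length := by
  fun_induction blankLit quote l <;> simp_all <;> omega

-- Source B's main loop: copy ordinary characters; on a quote, delegate the literal to blankLit.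
def stripB : List Char → List Char
  | [] => []
  | ch :: rest =>
    if ch = '"' ∨ ch = '\'' then
      ' ' :: ((blankLit ch rest).1 ++ stripB (blankLit ch rest).2)
    else ch :: stripB rest
  termination_by l => l.length
  decreasing_by
  · exact Nat.lt_succ_of_le (blankLit_len _ _)
  · simp [List.length]

def strip_string_literals_alt (text : String) : String :=
  String.ofList (stripB text.toList)

-- ===== PRECONDITION & SPEC =====
def Spec_strip_string_literals (text : String) (out : String) : Prop := out = strip_string_literals_alt text
instance (text : String) (out : String) : Decidable (Spec_strip_string_literals text out) := by unfold Spec_strip_string_literals; infer_instance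

-- ===== CLAIM (what is proved, stated in full; the proofs are below) =====
def Claim_equal_strip_string_literals : Prop := ∀ (text : String), Dom_strip_string_literals text → Spec_strip_string_literals text (strip_string_literals text)

-- ===== LEMMAS AND PROOFS =====

-- Inside a literal (exactly one of A's flags set; quote = '"' iff in_string), A produces the
-- blanked piece of B's helper and then resumes in the neutral state on B's remainder.
theorem stripA_lit_true (l : List Char) :
    stripA l true false
      = (blankLit '"' l).1 ++ stripA (blankLit '"' l).2 false false := by
  fun_induction blankLit '"' l with
  | case1 => simp [stripA]
  | case2 rest => rw [stripA.eq_def]; simp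
  | case3 rest h1 => rw [stripA.eq_def]; simp
  | case4 ch h1 h2 c2 rest2 h3 ih =>
      obtain ⟨hb, -⟩ := h3; subst hb
      rw [stripA.eq_def]; simp [ih]; split <;> simp
  | case5 ch h1 h2 h3 => exact absurd rfl h3.2
  | case6 ch rest h1 h2 h3 ih =>
      by_cases hb : ch = '\\'
      · have hr : rest = [] := by tauto
        subst hr; subst hb; rw [stripA.eq_def]; simp [blankLit, stripA]
      · rw [stripA.eq_def]; simp [h1, h2, hb, ih]

theorem stripA_lit_false (l : List Char) :
    stripA l false true
      = (blankLit '\'' l).1 ++ stripA (blankLit '\'' l).2 false false := by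
  fun_induction blankLit '\'' l with
  | case1 => simp [stripA]
  | case2 rest => rw [stripA.eq_def]; simp
  | case3 rest h1 => rw [stripA.eq_def]; simp
  | case4 ch h1 h2 c2 rest2 h3 ih =>
      obtain ⟨hb, -⟩ := h3; subst hb
      rw [stripA.eq_def]; simp [ih]; split <;> simp
  | case5 ch h1 h2 h3 => exact absurd rfl h3.2
  | case6 ch rest h1 h2 h3 ih =>
      by_cases hb : ch = '\\'
      · have hr : rest = [] := by tauto
        subst hr; subst hb; rw [stripA.eq_def]; simp [blankLit, stripA]
      · rw [stripA.eq_def]; simp [h1, h2, hb, ih]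

-- In the neutral state A copies ordinary characters and, at a quote, runs exactly one literal.
theorem stripA_eq_stripB (l : List Char) : stripA l false false = stripB l := by
  fun_induction stripB l with
  | case1 => simp [stripA]
  | case2 ch rest h ih =>
      rcases h with h | h <;> subst h <;> rw [stripA.eq_def]
      · simp [stripA_lit_true, ih]
      · simp [stripA_lit_false, ih]
  | case3 ch rest h ih =>
      rw [stripA.eq_def]
      simp only [not_or] at h
      simp [h.1, h.2, ih]

-- ===== VERDICT (by name: the statement is the Claim_ definition above) =====
theorem strip_string_literals_spec : Claim_equal_strip_string_literals := by
  intro text _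
  unfold Spec_strip_string_literals strip_string_literals strip_string_literals_alt
  rw [stripA_eq_stripB]
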